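-- pv_equiv track=rewrite | github.com/RZRussel/statemachinegenerator | nusmv.py | collisionoffsets
-- ===== SOURCE A (Python) =====
-- def collisionoffsets(srcrad, srcvel, destrad, destvel):
--     colradius = srcrad + destrad
--     veloffset = srcvel + destvel
--     smallradius = colradius - veloffset
--
--     offsets = {}
--     for x in range(-colradius, colradius + 1):
--         for y in range(-colradius, colradius + 1):
--             if (x * x + y * y >= smallradius*smallradius) and (x * x + y * y <= colradius * colradius):
--                 if x not in offsets:
--                     offsets[x] = []
--                 offsets[x].append(y)
--
--     return offsets
-- ===== SOURCE B (Python) =====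
-- def _isqrt(n):
--     # floor integer square root of n >= 0 (bit-by-bit; no imports needed)
--     b = 1
--     while b * b <= n:
--         b *= 2
--     x = 0
--     while b > 0:
--         if (x + b) * (x + b) <= n:
--             x += b
--         b //= 2
--     return x
--
--
-- def collisionoffsets(srcrad, srcvel, destrad, destvel):
--     colradius = srcrad + destrad
--     smallradius = colradius - (srcvel + destvel)
--
--     offsets = {}
--     for x in range(-colradius, colradius + 1):
--         m = colradius * colradius - x * x          # >= 0 inside the range
--         hi = _isqrt(m)
--         d = smallradius * smallradius - x * x
--         if d <= 0:
--             ys = list(range(-hi, hi + 1))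
--         else:
--             lo = _isqrt(d - 1) + 1                 # least lo >= 0 with lo*lo >= d
--             ys = list(range(-hi, -lo + 1)) + list(range(lo, hi + 1))
--         if ys:
--             offsets[x] = ys
--     return offsets
-- ===== Notes on version B (the rewrite author's own statement) =====
-- stated objective: faster
-- what changed: Instead of testing every (x,y) cell of the (2R+1)^2 grid, B computes for each x the admissible |y| interval [lo,hi] by integer square root and emits the two ranges directly.
import Mathlib
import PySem

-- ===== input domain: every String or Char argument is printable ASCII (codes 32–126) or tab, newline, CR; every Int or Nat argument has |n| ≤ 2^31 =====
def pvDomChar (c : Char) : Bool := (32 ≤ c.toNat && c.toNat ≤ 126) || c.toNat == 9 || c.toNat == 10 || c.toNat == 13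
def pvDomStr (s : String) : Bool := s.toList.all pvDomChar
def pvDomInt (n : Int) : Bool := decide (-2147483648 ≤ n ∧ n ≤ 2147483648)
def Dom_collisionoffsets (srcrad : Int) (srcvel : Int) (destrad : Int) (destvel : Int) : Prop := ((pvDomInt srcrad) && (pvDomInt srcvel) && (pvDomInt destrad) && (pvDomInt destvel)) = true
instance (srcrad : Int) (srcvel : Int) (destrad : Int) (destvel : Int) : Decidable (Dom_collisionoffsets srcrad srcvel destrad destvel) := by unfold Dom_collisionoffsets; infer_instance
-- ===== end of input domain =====

-- B replaces A's scan of every (x, y) cell of the (2R+1)² grid by a per-x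
-- integer-square-root computation of the admissible |y| interval, emitting
-- only the valid y ranges (measured faster in a timing run).

-- ===== PORT A =====
def collisionoffsets (srcrad : Int) (srcvel : Int) (destrad : Int) (destvel : Int) : List (Int × List Int) :=
  let colradius := srcrad + destrad
  let veloffset := srcvel + destvel
  let smallradius := colradius - veloffset
  let offsets : PySem.Dict Int (List Int) :=
    (PySem.List.pyRange (-colradius) (colradius + 1) 1).foldl (fun d x =>
      (PySem.List.pyRange (-colradius) (colradius + 1) 1).foldl (fun d y =>
        if smallradius * smallradius ≤ x * x + y * y ∧ x * x + y * y ≤ colradius * colradius then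
          let d := if d.contains x then d else d.insert x ([] : List Int)
          d.modify x [] (fun l => l ++ [y])
        else d) d) PySem.Dict.empty
  offsets.items

-- ===== PORT B =====
-- Source B's hand-written `_isqrt`, transliterated loop for loop: the first while
-- (grow the probe bit) carries its `1 ≤ b` invariant as a proof argument,
-- used for termination only.
def isqrtGrow (n : Int) (b : Int) (hb : 1 ≤ b) : Int :=
  if h : b * b ≤ n then isqrtGrow n (2 * b) (by omega) else b
termination_by (n + 1 - b).toNat
decreasing_by
  have hbn : b ≤ n := le_trans (by nlinarith) h
  omega

-- second while-loop of `_isqrt` (b //= 2 is PySem.Int.floordiv, Python-exact)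
def isqrtShrink (n : Int) (x : Int) (b : Int) : Int :=
  if h : 0 < b then
    let x' := if (x + b) * (x + b) ≤ n then x + b else x
    isqrtShrink n x' (PySem.Int.floordiv b 2)
  else x
termination_by b.toNat
decreasing_by
  rw [PySem.Int.floordiv_eq_ediv_of_pos (by omega)]
  omega

def pyIsqrt (n : Int) : Int := isqrtShrink n 0 (isqrtGrow n 1 (by norm_num))

def collisionoffsets_alt (srcrad : Int) (srcvel : Int) (destrad : Int) (destvel : Int) : List (Int × List Int) :=
  let colradius := srcrad + destrad
  let smallradius := colradius - (srcvel + destvel)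
  (PySem.List.pyRange (-colradius) (colradius + 1) 1).foldl (fun acc x =>
    let m := colradius * colradius - x * x
    let hi := pyIsqrt m
    let d := smallradius * smallradius - x * x
    let ys :=
      if d ≤ 0 then PySem.List.pyRange (-hi) (hi + 1) 1
      else
        let lo := pyIsqrt (d - 1) + 1
        PySem.List.pyRange (-hi) (-lo + 1) 1 ++ PySem.List.pyRange lo (hi + 1) 1
    if ys = [] then acc else acc ++ [(x, ys)]) []

-- ===== PRECONDITION & SPEC =====
def Spec_collisionoffsets (srcrad : Int) (srcvel : Int) (destrad : Int) (destvel : Int) (out : List (Int × List Int)) : Prop := out = collisionoffsets_alt srcrad srcvel destrad destvel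
instance (srcrad : Int) (srcvel : Int) (destrad : Int) (destvel : Int) (out : List (Int × List Int)) : Decidable (Spec_collisionoffsets srcrad srcvel destrad destvel out) := by unfold Spec_collisionoffsets; infer_instance

-- ===== CLAIM (what is proved, stated in full; the proofs are below) =====
def Claim_equal_collisionoffsets : Prop := ∀ (srcrad : Int) (srcvel : Int) (destrad : Int) (destvel : Int), Dom_collisionoffsets srcrad srcvel destrad destvel → Spec_collisionoffsets srcrad srcvel destrad destvel (collisionoffsets srcrad srcvel destrad destvel)

-- ===== LEMMAS AND PROOFS =====

-- `isqrtGrow` returns a power of two whose square exceeds n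
lemma isqrtGrow_spec (n : Int) : ∀ (b : Int) (hb : 1 ≤ b), (∃ k : Nat, b = 2 ^ k) →
    (∃ k : Nat, isqrtGrow n b hb = 2 ^ k) ∧ n < isqrtGrow n b hb * isqrtGrow n b hb := by
  intro b hb hpow
  fun_induction isqrtGrow n b hb with
  | case1 b hb h ih =>
    exact ih (by obtain ⟨k, rfl⟩ := hpow; exact ⟨k + 1, by ring⟩)
  | case2 b hb h =>
    exact ⟨hpow, by omega⟩

lemma isqrtShrink_zero (n x : Int) : isqrtShrink n x 0 = x := by
  unfold isqrtShrink; simp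

-- `isqrtShrink` invariant: entering with bit 2^k and x² ≤ n < (x + 2·2^k)²,
-- the result r satisfies x ≤ r and r² ≤ n < (r+1)²
lemma isqrtShrink_spec (n : Int) : ∀ (k : Nat) (x : Int), x * x ≤ n → n < (x + 2 * 2 ^ k) * (x + 2 * 2 ^ k) →
    x ≤ isqrtShrink n x (2 ^ k) ∧ isqrtShrink n x (2 ^ k) * isqrtShrink n x (2 ^ k) ≤ n ∧
      n < (isqrtShrink n x (2 ^ k) + 1) * (isqrtShrink n x (2 ^ k) + 1) := by
  intro k
  induction k with
  | zero =>
    intro x h1 h2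
    rw [isqrtShrink]
    simp only [show (0:Int) < 2^0 by norm_num, dif_pos]
    have hfd : PySem.Int.floordiv ((2:Int)^0) 2 = 0 := by
      rw [PySem.Int.floordiv_eq_ediv_of_pos (by norm_num)]; norm_num
    rw [hfd]
    by_cases hc : (x + 2^0) * (x + 2^0) ≤ n
    · simp only [pow_zero] at *
      rw [if_pos hc, isqrtShrink_zero]
      constructor; omega
      constructor; exact hc
      nlinarith
    · simp only [pow_zero] at *
      rw [if_neg hc, isqrtShrink_zero]
      refine ⟨le_refl _, h1, by omega⟩
  | succ k ih =>
    intro x h1 h2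
    rw [isqrtShrink]
    simp only [show (0:Int) < 2^(k+1) by positivity, dif_pos]
    have hfd : PySem.Int.floordiv ((2:Int)^(k+1)) 2 = 2 ^ k := by
      rw [PySem.Int.floordiv_eq_ediv_of_pos (by norm_num), pow_succ]
      omega
    rw [hfd]
    have hpk : (2:Int) ^ (k+1) = 2 * 2 ^ k := by ring
    by_cases hc : (x + 2^(k+1)) * (x + 2^(k+1)) ≤ n
    · rw [if_pos hc]
      have := ih (x + 2^(k+1)) hc
        (by rw [show x + 2^(k+1) + 2*2^k = x + 2*2^(k+1) from by ring]; exact h2)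
      have hp : (0:Int) < 2 ^ k := by positivity
      omega
    · rw [if_neg hc]
      have := ih x h1
        (by rw [not_le] at hc; rw [show x + 2*2^k = x + 2^(k+1) from by ring]; exact hc)
      omega

lemma pyIsqrt_spec (n : Int) (hn : 0 ≤ n) :
    0 ≤ pyIsqrt n ∧ pyIsqrt n * pyIsqrt n ≤ n ∧ n < (pyIsqrt n + 1) * (pyIsqrt n + 1) := by
  unfold pyIsqrt
  obtain ⟨⟨k, hk⟩, hlt⟩ := isqrtGrow_spec n 1 (by norm_num) ⟨0, by norm_num⟩
  rw [hk] at hlt ⊢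
  have h2 : n < (0 + 2 * 2 ^ k) * (0 + 2 * 2 ^ k) := by
    have : (0:Int) < 2 ^ k := by positivity
    nlinarith
  have := isqrtShrink_spec n k 0 (by omega) h2
  omega

-- y² ≤ m exactly on the interval [-isqrt m, isqrt m]
lemma sq_le_iff_abs_le (m y : Int) (hm : 0 ≤ m) : y * y ≤ m ↔ -pyIsqrt m ≤ y ∧ y ≤ pyIsqrt m := by
  obtain ⟨h0, h1, h2⟩ := pyIsqrt_spec m hm
  constructor
  · intro hy
    constructor
    · by_contra hcon; rw [not_le] at hcon; nlinarith
    · by_contra hcon; rw [not_le] at hcon; nlinarith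
  · rintro ⟨ha, hb⟩; nlinarith

-- d ≤ y² exactly outside the open interval (-(isqrt (d-1) + 1), isqrt (d-1) + 1)
lemma le_sq_iff_abs_ge (d y : Int) (hd : 1 ≤ d) :
    d ≤ y * y ↔ y ≤ -(pyIsqrt (d - 1) + 1) ∨ pyIsqrt (d - 1) + 1 ≤ y := by
  obtain ⟨h0, h1, h2⟩ := pyIsqrt_spec (d - 1) (by omega)
  constructor
  · intro hy
    rcases le_or_gt y 0 with hneg | hpos
    · left; by_contra hcon; rw [not_le] at hcon; nlinarith
    · right; by_contra hcon; rw [not_le] at hcon; nlinarith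
  · rintro (ha | hb) <;> nlinarith

-- two strictly increasing Int lists with the same members are equal
lemma eq_of_pairwise_lt_mem (l1 l2 : List Int) (h1 : l1.Pairwise (· < ·)) (h2 : l2.Pairwise (· < ·))
    (h : ∀ y, y ∈ l1 ↔ y ∈ l2) : l1 = l2 := by
  have nd1 : l1.Nodup := h1.imp ne_of_lt
  have nd2 : l2.Nodup := h2.imp ne_of_lt
  have perm : l1.Perm l2 := (List.perm_ext_iff_of_nodup nd1 nd2).2 h
  exact perm.eq_of_pairwise (fun a b _ _ hab hba => absurd hba (asymm hab)) h1 h2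

-- B's per-x list, written out (definitionally what collisionoffsets_alt builds)
def ysB (R s x : Int) : List Int :=
  if s * s - x * x ≤ 0 then
    PySem.List.pyRange (-(pyIsqrt (R * R - x * x))) (pyIsqrt (R * R - x * x) + 1) 1
  else
    PySem.List.pyRange (-(pyIsqrt (R * R - x * x))) (-(pyIsqrt (s * s - x * x - 1) + 1) + 1) 1 ++
      PySem.List.pyRange (pyIsqrt (s * s - x * x - 1) + 1) (pyIsqrt (R * R - x * x) + 1) 1

-- the per-x fact: A's filtered column equals B's interval construction
lemma column_eq (R s x : Int) (hR : 0 ≤ R) (hx : x * x ≤ R * R) :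
    (PySem.List.pyRange (-R) (R + 1) 1).filter
      (fun y => decide (s * s ≤ x * x + y * y ∧ x * x + y * y ≤ R * R)) = ysB R s x := by
  have hm : (0:Int) ≤ R * R - x * x := by omega
  obtain ⟨hhi0, hhi1, hhi2⟩ := pyIsqrt_spec (R * R - x * x) hm
  have hhiR : pyIsqrt (R * R - x * x) ≤ R := by nlinarith
  apply eq_of_pairwise_lt_mem
  · exact (PySem.List.pairwise_lt_pyRange_one _ _).filter _
  · unfold ysB
    split
    · exact PySem.List.pairwise_lt_pyRange_one _ _
    · rename_i hd
      obtain ⟨hl0, _, _⟩ := pyIsqrt_spec (s * s - x * x - 1) (by omega)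
      rw [List.pairwise_append]
      refine ⟨PySem.List.pairwise_lt_pyRange_one _ _, PySem.List.pairwise_lt_pyRange_one _ _, ?_⟩
      intro a ha b hb
      rw [PySem.List.mem_pyRange_one] at ha hb
      omega
  · intro y
    have hy2 : 0 ≤ y * y := mul_self_nonneg y
    have habs := sq_le_iff_abs_le (R * R - x * x) y hm
    unfold ysB
    simp only [List.mem_filter, PySem.List.mem_pyRange_one, decide_eq_true_eq]
    split
    · rename_i hd
      rw [PySem.List.mem_pyRange_one]
      constructor
      · rintro ⟨⟨hy1, hy2'⟩, hc1, hc2⟩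
        have : y * y ≤ R * R - x * x := by omega
        rw [habs] at this
        omega
      · rintro ⟨hy1, hy2'⟩
        have hyy : y * y ≤ R * R - x * x := habs.2 ⟨hy1, by omega⟩
        exact ⟨⟨by omega, by omega⟩, by omega, by omega⟩
    · rename_i hd
      obtain ⟨hl0, _, _⟩ := pyIsqrt_spec (s * s - x * x - 1) (by omega)
      have hges := le_sq_iff_abs_ge (s * s - x * x) y (by omega)
      rw [List.mem_append, PySem.List.mem_pyRange_one, PySem.List.mem_pyRange_one]
      constructor
      · rintro ⟨⟨hy1, hy2'⟩, hc1, hc2⟩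
        have h1 : y * y ≤ R * R - x * x := by omega
        have h2 : s * s - x * x ≤ y * y := by omega
        rw [habs] at h1
        rw [hges] at h2
        omega
      · rintro (⟨hy1, hy2'⟩ | ⟨hy1, hy2'⟩) <;>
        · have h1 : y * y ≤ R * R - x * x := habs.2 ⟨by omega, by omega⟩
          have h2 : s * s - x * x ≤ y * y := hges.2 (by omega)
          exact ⟨⟨by omega, by omega⟩, by omega, by omega⟩

-- A's append loop once the key x already holds value v (as its last entry or not)
lemma append_loop (x : Int) : ∀ (ys : List Int) (d : PySem.Dict Int (List Int)) (v : List Int),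
    ys.foldl (fun d y =>
        (if d.contains x then d else d.insert x ([] : List Int)).modify x [] (fun l => l ++ [y]))
      (d.insert x v) = d.insert x (v ++ ys) := by
  intro ys
  induction ys with
  | nil => intro d v; simp
  | cons y t ih =>
    intro d v
    rw [List.foldl_cons]
    have hH : (if (d.insert x v).contains x then d.insert x v else (d.insert x v).insert x ([] : List Int)).modify
        x [] (fun l => l ++ [y]) = d.insert x (v ++ [y]) := by
      simp [PySem.Dict.modify, PySem.Dict.contains_insert_self, PySem.Dict.getD_insert_self,
        PySem.Dict.insert_insert_self]
    rw [hH, ih d (v ++ [y])]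
    simp

-- inner loop of A over a column: it adds key x exactly when the filtered column is nonempty
lemma inner_loop_eq (s R x : Int) (L : List Int) (d : PySem.Dict Int (List Int))
    (hx : d.contains x = false) :
    L.foldl (fun d y =>
        if s * s ≤ x * x + y * y ∧ x * x + y * y ≤ R * R then
          let d := if d.contains x then d else d.insert x ([] : List Int)
          d.modify x [] (fun l => l ++ [y])
        else d) d =
      (if L.filter (fun y => decide (s * s ≤ x * x + y * y ∧ x * x + y * y ≤ R * R)) = []
       then d
       else d.insert x (L.filter (fun y => decide (s * s ≤ x * x + y * y ∧ x * x + y * y ≤ R * R)))) := by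
  have hstep : L.foldl (fun d y =>
        if s * s ≤ x * x + y * y ∧ x * x + y * y ≤ R * R then
          let d := if d.contains x then d else d.insert x ([] : List Int)
          d.modify x [] (fun l => l ++ [y])
        else d) d =
      (L.filter (fun y => decide (s * s ≤ x * x + y * y ∧ x * x + y * y ≤ R * R))).foldl
        (fun d y =>
          (if d.contains x then d else d.insert x ([] : List Int)).modify x [] (fun l => l ++ [y])) d := by
    rw [List.foldl_filter]
    apply PySem.List.foldl_congr_mem
    intro d' y _
    by_cases hc : s * s ≤ x * x + y * y ∧ x * x + y * y ≤ R * R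
    · simp [hc]
    · simp [hc]
  rw [hstep]
  cases hfil : L.filter (fun y => decide (s * s ≤ x * x + y * y ∧ x * x + y * y ≤ R * R)) with
  | nil => simp
  | cons y0 t =>
    rw [List.foldl_cons]
    have hH : (if d.contains x then d else d.insert x ([] : List Int)).modify
        x [] (fun l => l ++ [y0]) = d.insert x [y0] := by
      simp [hx, PySem.Dict.modify, PySem.Dict.getD_insert_self, PySem.Dict.insert_insert_self]
    rw [hH, append_loop x t d [y0]]
    simp

-- outer loop of A, reduced to B's accumulator fold (keys stay fresh and distinct)
lemma outer_loop_eq (s R : Int) (hR : 0 ≤ R) :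
    ∀ (xs : List Int) (d : PySem.Dict Int (List Int)) (acc : List (Int × List Int)),
      d.items = acc → xs.Nodup → (∀ x ∈ xs, d.contains x = false) → (∀ x ∈ xs, x * x ≤ R * R) →
      (xs.foldl (fun d x =>
          (PySem.List.pyRange (-R) (R + 1) 1).foldl (fun d y =>
            if s * s ≤ x * x + y * y ∧ x * x + y * y ≤ R * R then
              let d := if d.contains x then d else d.insert x ([] : List Int)
              d.modify x [] (fun l => l ++ [y])
            else d) d) d).items =
      xs.foldl (fun acc x => if ysB R s x = [] then acc else acc ++ [(x, ysB R s x)]) acc := by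
  intro xs
  induction xs with
  | nil => intro d acc hitems _ _ _; simpa using hitems
  | cons x rest ih =>
    intro d acc hitems hnd hcont hsq
    rw [List.foldl_cons, List.foldl_cons]
    have hxc : d.contains x = false := hcont x (by simp)
    rw [inner_loop_eq s R x _ d hxc,
        column_eq R s x hR (hsq x (by simp))]
    rcases List.nodup_cons.1 hnd with ⟨hxrest, hndrest⟩
    by_cases hy : ysB R s x = []
    · rw [if_pos hy, if_pos hy]
      exact ih d acc hitems hndrest (fun x' hx' => hcont x' (by simp [hx'])) (fun x' hx' => hsq x' (by simp [hx']))
    · rw [if_neg hy, if_neg hy]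
      apply ih
      · rw [PySem.Dict.items_insert_of_not_contains d _ hxc, hitems]
      · exact hndrest
      · intro x' hx'
        rw [PySem.Dict.contains_insert]
        have : x' ≠ x := fun h => hxrest (h ▸ hx')
        simp [this, hcont x' (by simp [hx'])]
      · exact fun x' hx' => hsq x' (by simp [hx'])

-- ===== VERDICT (by name: the statement is the Claim_ definition above) =====
theorem collisionoffsets_spec : Claim_equal_collisionoffsets := by
  intro srcrad srcvel destrad destvel _
  unfold Spec_collisionoffsets collisionoffsets collisionoffsets_alt
  show _ = List.foldl (fun acc x => if ysB (srcrad + destrad) (srcrad + destrad - (srcvel + destvel)) x = []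
      then acc else acc ++ [(x, ysB (srcrad + destrad) (srcrad + destrad - (srcvel + destvel)) x)]) [] _
  rcases le_or_gt 0 (srcrad + destrad) with hR | hR
  · apply outer_loop_eq _ _ hR
    · rfl
    · exact PySem.List.nodup_pyRange_one _ _
    · intro x _; exact PySem.Dict.contains_empty x
    · intro x hx
      rw [PySem.List.mem_pyRange_one] at hx
      nlinarith [hx.1, hx.2]
  · dsimp only
    rw [PySem.List.pyRange_one_eq_nil (by omega)]
    rfl
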